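-- pv_equiv track=rewrite | github.com/TheDarkAngel099/PGADAI_PYTHON | Assignment1/flip_case_of_vowels.py | flip_vowel_case
-- ===== SOURCE A (Python) =====
-- def flip_vowel_case(s):
--     vowels = "aeiouAEIOU"
--     result = ""
--
--     for char in s:
--         if char in vowels:
--             if char.islower():
--                 result += char.upper()
--             else:
--                 result += char.lower()
--         else:
--             result += char
--     return result
-- ===== SOURCE B (Python) =====
-- def flip_vowel_case(s):
--     table = str.maketrans("aeiouAEIOU", "AEIOUaeiou")
--     return s.translate(table)
-- ===== Notes on version B (the rewrite author's own statement) =====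
-- stated objective: idiomatic
-- what changed: Replaces the explicit per-character loop with islower/upper branching and repeated string += by a precomputed translation table (str.maketrans) applied in one s.translate call.
import Mathlib
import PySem

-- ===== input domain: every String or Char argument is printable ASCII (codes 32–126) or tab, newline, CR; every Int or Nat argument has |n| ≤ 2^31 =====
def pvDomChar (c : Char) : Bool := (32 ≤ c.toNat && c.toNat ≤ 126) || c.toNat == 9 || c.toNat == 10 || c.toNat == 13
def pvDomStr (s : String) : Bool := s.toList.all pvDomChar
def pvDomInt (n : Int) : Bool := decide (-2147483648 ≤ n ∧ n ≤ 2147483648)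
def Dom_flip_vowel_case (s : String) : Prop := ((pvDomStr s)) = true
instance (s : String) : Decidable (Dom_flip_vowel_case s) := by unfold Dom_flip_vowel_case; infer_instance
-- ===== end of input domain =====

-- B replaces A's per-character branch loop by a precomputed flip table applied char-wise (idiomatic str.translate).


-- ===== PORT A =====
-- loop over s appending to result; 'char in vowels' for a 1-char char is membership in the vowel list
def flip_vowel_case (s : String) : String :=
  let vowels := "aeiouAEIOU"
  String.mk (s.toList.foldl (fun result char =>
    if vowels.toList.contains char then
      if PySem.Chars.islower char then result ++ [PySem.Chars.upperChar char]
      else result ++ [PySem.Chars.lowerChar char]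
    else result ++ [char]) [])

-- ===== PORT B =====
-- str.maketrans of the two vowel strings = a char→char dict; s.translate maps each char through it (identity when absent)
def flipTable : PySem.Dict Char Char :=
  PySem.Dict.ofList (List.zip "aeiouAEIOU".toList "AEIOUaeiou".toList)

def flip_vowel_case_alt (s : String) : String :=
  String.mk (s.toList.map (fun c => flipTable.getD c c))

-- ===== PRECONDITION & SPEC =====
def Spec_flip_vowel_case (s : String) (out : String) : Prop := out = flip_vowel_case_alt s
instance (s : String) (out : String) : Decidable (Spec_flip_vowel_case s out) := by unfold Spec_flip_vowel_case; infer_instance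

-- ===== CLAIM (what is proved, stated in full; the proofs are below) =====
def Claim_equal_flip_vowel_case : Prop := ∀ (s : String), Dom_flip_vowel_case s → Spec_flip_vowel_case s (flip_vowel_case s)

-- ===== LEMMAS AND PROOFS =====

-- per-character agreement between A's branch and B's table lookup
theorem step_eq (c : Char) :
    (if ("aeiouAEIOU".toList.contains c) then
       if PySem.Chars.islower c then PySem.Chars.upperChar c else PySem.Chars.lowerChar c
     else c) = flipTable.getD c c := by
  have hlist : "aeiouAEIOU".toList = ['a','e','i','o','u','A','E','I','O','U'] := rfl
  cases hb : "aeiouAEIOU".toList.contains c with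
  | true =>
    have h : c ∈ (['a','e','i','o','u','A','E','I','O','U'] : List Char) := by
      rw [hlist] at hb; simpa using hb
    fin_cases h <;> decide
  | false =>
    have h : c ∉ (['a','e','i','o','u','A','E','I','O','U'] : List Char) := by
      rw [hlist] at hb; simpa using hb
    simp only [hb, Bool.false_eq_true, if_false]
    simp only [List.mem_cons, List.not_mem_nil, or_false, not_or] at h
    obtain ⟨h1, h2, h3, h4, h5, h6, h7, h8, h9, h10⟩ := h
    have hT : flipTable = PySem.Dict.mk [('a','A'),('e','E'),('i','I'),('o','O'),('u','U'),
        ('A','a'),('E','e'),('I','i'),('O','o'),('U','u')] := by decide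
    simp [hT, PySem.Dict.getD, PySem.Dict.get?_mk_cons, PySem.Dict.get?,
          h1, h2, h3, h4, h5, h6, h7, h8, h9, h10,
          Ne.symm h1, Ne.symm h2, Ne.symm h3, Ne.symm h4, Ne.symm h5,
          Ne.symm h6, Ne.symm h7, Ne.symm h8, Ne.symm h9, Ne.symm h10]

theorem foldl_eq_map (l acc : List Char) :
    (l.foldl (fun result char =>
      if ("aeiouAEIOU".toList.contains char) then
        if PySem.Chars.islower char then result ++ [PySem.Chars.upperChar char]
        else result ++ [PySem.Chars.lowerChar char]
      else result ++ [char]) acc) = acc ++ l.map (fun c => flipTable.getD c c) := by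
  induction l generalizing acc with
  | nil => simp
  | cons c t ih =>
    simp only [List.foldl_cons, List.map_cons]
    rw [ih, ← step_eq c]
    cases hb : "aeiouAEIOU".toList.contains c <;>
      cases hl : PySem.Chars.islower c <;>
      simp only [hb, hl, Bool.false_eq_true, if_true, if_false, List.append_assoc,
        List.singleton_append]

-- ===== VERDICT (by name: the statement is the Claim_ definition above) =====
theorem flip_vowel_case_spec : Claim_equal_flip_vowel_case := by
  intro s _
  show String.mk _ = _
  rw [foldl_eq_map]
  rfl
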